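-- pv_equiv track=rewrite | github.com/jonathan-aulson/autodocx | autodocx/render/business_renderer.py | _relationship_matrix_table
-- ===== SOURCE A (Python) =====
-- from collections import defaultdict
-- from typing import Dict, Any, List, Optional
--
-- def _relationship_matrix_table(rels: List[Dict[str, Any]]) -> str:
--     if not rels:
--         return ""
--     matrix = defaultdict(lambda: defaultdict(int))
--     for rel in rels:
--         kind = ((rel.get("target") or {}).get("kind") or "unknown").lower()
--         op = ((rel.get("operation") or {}).get("type") or "touches").lower()
--         matrix[kind][op] += 1
--     rows = ["| Target Kind | Operation | Count |", "|-------------|-----------|-------|"]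
--     for kind in sorted(matrix.keys()):
--         for op in sorted(matrix[kind].keys()):
--             rows.append(f"| {kind} | {op} | {matrix[kind][op]} |")
--     return "\n".join(rows)
-- ===== SOURCE B (Python) =====
-- def _relationship_matrix_table(rels):
--     if not rels:
--         return ""
--     pairs = sorted(
--         ((((rel.get("target") or {}).get("kind") or "unknown").lower(),
--           ((rel.get("operation") or {}).get("type") or "touches").lower())
--          for rel in rels))
--     rows = ["| Target Kind | Operation | Count |", "|-------------|-----------|-------|"]
--     i = 0
--     n = len(pairs)
--     while i < n:
--         j = i
--         while j < n and pairs[j] == pairs[i]: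
--             j += 1
--         kind, op = pairs[i]
--         rows.append(f"| {kind} | {op} | {j - i} |")
--         i = j
--     return "\n".join(rows)
-- ===== Notes on version B (the rewrite author's own statement) =====
-- stated objective: alternative
-- what changed: Replaces the nested defaultdict counting plus two nested sorted loops with no dictionary at all: sort the raw list of normalized (kind, op) pairs once, then emit one row per run of equal adjacent pairs (run-length scan), the run length being the count.
import Mathlib
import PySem

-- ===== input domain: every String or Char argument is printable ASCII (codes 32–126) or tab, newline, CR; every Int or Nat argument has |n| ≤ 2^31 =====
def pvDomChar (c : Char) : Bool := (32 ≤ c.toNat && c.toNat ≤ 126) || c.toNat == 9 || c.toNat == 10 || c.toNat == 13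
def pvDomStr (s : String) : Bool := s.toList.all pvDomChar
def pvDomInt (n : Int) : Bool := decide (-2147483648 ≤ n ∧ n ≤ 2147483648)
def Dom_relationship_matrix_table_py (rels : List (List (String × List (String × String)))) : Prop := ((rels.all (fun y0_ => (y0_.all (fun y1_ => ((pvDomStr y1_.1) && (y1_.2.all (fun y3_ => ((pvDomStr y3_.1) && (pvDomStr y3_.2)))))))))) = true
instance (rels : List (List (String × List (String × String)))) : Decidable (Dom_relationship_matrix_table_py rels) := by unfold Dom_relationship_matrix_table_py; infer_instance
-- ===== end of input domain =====

-- B drops the dictionary entirely: it sorts the raw list of normalized (kind, op) pairs once and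
-- emits one row per run of equal adjacent pairs, the run length being the count (objective: alternative).

-- ===== PORT A =====
-- kind = ((rel.get("target") or {}).get("kind") or "unknown").lower()
-- ('or {}' collapses to a default lookup: both the missing and the falsy-empty dict become {})
def pvKindA (rel : List (String × List (String × String))) : String :=
  let t := ((PySem.Dict.mk rel).get? "target").getD []
  let k := match (PySem.Dict.mk t).get? "kind" with
    | some s => if s = "" then "unknown" else s
    | none => "unknown"
  PySem.Str.lower k

-- op = ((rel.get("operation") or {}).get("type") or "touches").lower()
def pvOpA (rel : List (String × List (String × String))) : String :=
  let t := ((PySem.Dict.mk rel).get? "operation").getD []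
  let k := match (PySem.Dict.mk t).get? "type" with
    | some s => if s = "" then "touches" else s
    | none => "touches"
  PySem.Str.lower k

def relationship_matrix_table_py (rels : List (List (String × List (String × String)))) : String :=
  if rels = [] then "" else
  let matrix := rels.foldl (fun m rel =>
      m.modify (pvKindA rel) (PySem.Dict.mk []) (fun inner => inner.modify (pvOpA rel) 0 (· + 1)))
    (PySem.Dict.mk [])
  let rows := (PySem.List.sorted matrix.keys (fun x => x)).foldl (fun acc kind =>
      (PySem.List.sorted (matrix.getD kind (PySem.Dict.mk [])).keys (fun x => x)).foldl (fun acc2 op =>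
        acc2 ++ ["| " ++ kind ++ " | " ++ op ++ " | " ++
          PySem.Int.toStr ((matrix.getD kind (PySem.Dict.mk [])).getD op 0) ++ " |"]) acc)
    ["| Target Kind | Operation | Count |", "|-------------|-----------|-------|"]
  PySem.Str.join "\n" rows

-- ===== PORT B =====
-- B computes the same normalized pair (helpers shared with port A above)
def pvKeyB (rel : List (String × List (String × String))) : String × String :=
  (pvKindA rel, pvOpA rel)

-- Source B's outer while loop over the sorted pair list as structural recursion: the inner
-- 'while j < n and pairs[j] == pairs[i]' run is exactly the takeWhile prefix (j - i = 1 + its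
-- length over the tail), and 'i = j' advances past it (dropWhile).
def pvRowsB : List (String × String) → List String
  | [] => []
  | p :: rest =>
      ("| " ++ p.1 ++ " | " ++ p.2 ++ " | " ++
        PySem.Int.toStr (1 + ((rest.takeWhile (· == p)).length : Int)) ++ " |")
        :: pvRowsB (rest.dropWhile (· == p))
termination_by l => l.length
decreasing_by
  simp only [List.length_cons]
  exact Nat.lt_succ_of_le (List.length_dropWhile_le _ _)

def relationship_matrix_table_py_alt (rels : List (List (String × List (String × String)))) : String :=
  if rels = [] then "" else
  let pairs := PySem.List.sorted2 (rels.map pvKeyB) Prod.fst Prod.snd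
  PySem.Str.join "\n"
    (["| Target Kind | Operation | Count |", "|-------------|-----------|-------|"] ++ pvRowsB pairs)

-- ===== PRECONDITION & SPEC =====
def Spec_relationship_matrix_table_py (rels : List (List (String × List (String × String)))) (out : String) : Prop := out = relationship_matrix_table_py_alt rels
instance (rels : List (List (String × List (String × String)))) (out : String) : Decidable (Spec_relationship_matrix_table_py rels out) := by unfold Spec_relationship_matrix_table_py; infer_instance

-- ===== CLAIM (what is proved, stated in full; the proofs are below) =====
def Claim_equal_relationship_matrix_table_py : Prop := ∀ (rels : List (List (String × List (String × String)))), Dom_relationship_matrix_table_py rels → Spec_relationship_matrix_table_py rels (relationship_matrix_table_py rels)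

-- ===== LEMMAS AND PROOFS =====

-- the Bool comparator sorted2 sorts with, and the strict lexicographic order it decides
def pvLtB (p q : String × String) : Bool :=
  decide (p.1 < q.1) || (!decide (q.1 < p.1) && decide (p.2 < q.2))

def pvLex (p q : String × String) : Prop := p.1 < q.1 ∨ (p.1 = q.1 ∧ p.2 < q.2)

lemma pvLtB_iff (p q : String × String) : pvLtB p q = true ↔ pvLex p q := by
  unfold pvLtB pvLex
  simp only [Bool.or_eq_true, Bool.and_eq_true, Bool.not_eq_true', decide_eq_true_eq,
    decide_eq_false_iff_not]
  constructor
  · rintro (h | ⟨h1, h2⟩)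
    · exact Or.inl h
    · by_cases hpq : p.1 < q.1
      · exact Or.inl hpq
      · exact Or.inr ⟨le_antisymm (not_lt.mp h1) (not_lt.mp hpq), h2⟩
  · rintro (h | ⟨h1, h2⟩)
    · exact Or.inl h
    · exact Or.inr ⟨by rw [h1]; exact lt_irrefl _, h2⟩

lemma pvLex_asymm (p q : String × String) (h : pvLex p q) : ¬ pvLex q p := by
  unfold pvLex at *
  rcases h with h | ⟨h1, h2⟩ <;> rintro (h' | ⟨h1', h2'⟩)
  · exact lt_asymm h h'
  · rw [h1'] at h; exact lt_irrefl _ h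
  · rw [h1] at h'; exact lt_irrefl _ h'
  · exact lt_asymm h2 h2'

lemma pvLex_conn (p q : String × String) (hne : p ≠ q) : pvLex p q ∨ pvLex q p := by
  unfold pvLex
  rcases lt_trichotomy p.1 q.1 with h | h | h
  · exact Or.inl (Or.inl h)
  · rcases lt_trichotomy p.2 q.2 with h' | h' | h'
    · exact Or.inl (Or.inr ⟨h, h'⟩)
    · exact absurd (Prod.ext h h') hne
    · exact Or.inr (Or.inr ⟨h.symm, h'⟩)
  · exact Or.inr (Or.inl h)

lemma pvLtB_asymm (p q : String × String) (h : pvLtB p q = true) : pvLtB q p = false := by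
  rw [Bool.eq_false_iff]
  intro h'
  exact pvLex_asymm p q ((pvLtB_iff p q).mp h) ((pvLtB_iff q p).mp h')

lemma pvLtB_trans (p q r : String × String) (h1 : pvLtB p q = true) (h2 : pvLtB q r = true) :
    pvLtB p r = true := by
  rw [pvLtB_iff] at *
  rcases h1 with h1 | ⟨h1a, h1b⟩ <;> rcases h2 with h2 | ⟨h2a, h2b⟩
  · exact Or.inl (lt_trans h1 h2)
  · exact Or.inl (h2a ▸ h1)
  · exact Or.inl (h1a ▸ h2)
  · exact Or.inr ⟨h1a.trans h2a, lt_trans h1b h2b⟩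

lemma pvLtB_conn (p q : String × String) (h1 : pvLtB p q = false) (h2 : pvLtB q p = false) :
    p = q := by
  by_contra hne
  rcases pvLex_conn p q hne with h | h
  · rw [← pvLtB_iff] at h; rw [h1] at h; exact Bool.false_ne_true h
  · rw [← pvLtB_iff] at h; rw [h2] at h; exact Bool.false_ne_true h

-- insertion into a list sorted by ¬ pvLtB-above stays sorted
lemma pairwise_insertBy (x : String × String) (l : List (String × String))
    (h : l.Pairwise (fun a b => pvLtB b a = false)) :
    (PySem.List.insertBy pvLtB x l).Pairwise (fun a b => pvLtB b a = false) := by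
  induction l with
  | nil => rw [PySem.List.insertBy]; exact List.pairwise_singleton _ _
  | cons y ys ih =>
    rw [PySem.List.insertBy]
    rcases List.pairwise_cons.mp h with ⟨hy, hys⟩
    by_cases hxy : pvLtB x y = true
    · simp only [hxy, if_true]
      refine List.pairwise_cons.mpr ⟨?_, h⟩
      intro z hz
      rcases List.mem_cons.mp hz with he | hz
      · rw [he]; exact pvLtB_asymm x y hxy
      · by_contra hc
        rw [Bool.not_eq_false] at hc
        have := pvLtB_trans z x y hc hxy
        rw [hy z hz] at this
        exact Bool.false_ne_true this
    · simp only [hxy]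
      refine List.pairwise_cons.mpr ⟨?_, ih hys⟩
      intro z hz
      rcases (PySem.List.mem_insertBy _ _ _ _).mp hz with rfl | hz
      · exact Bool.eq_false_iff.mpr hxy
      · exact hy z hz

lemma pairwise_foldl_insertBy (xs acc : List (String × String))
    (h : acc.Pairwise (fun a b => pvLtB b a = false)) :
    (xs.foldl (fun acc x => PySem.List.insertBy pvLtB x acc) acc).Pairwise
      (fun a b => pvLtB b a = false) := by
  induction xs generalizing acc with
  | nil => exact h
  | cons x xs ih => exact ih _ (pairwise_insertBy x acc h)

lemma sorted2_pairwise (xs : List (String × String)) :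
    (PySem.List.sorted2 xs Prod.fst Prod.snd).Pairwise (fun a b => pvLtB b a = false) := by
  have hdef : PySem.List.sorted2 xs Prod.fst Prod.snd
      = xs.foldl (fun acc x => PySem.List.insertBy pvLtB x acc) [] := rfl
  rw [hdef]
  exact pairwise_foldl_insertBy xs [] List.Pairwise.nil

-- per-kind ops, and the flat key list
def pvOps (rels : List (List (String × List (String × String)))) (k : String) : List String :=
  (rels.filter (fun r => pvKindA r == k)).map pvOpA

def pvPairs (rels : List (List (String × List (String × String)))) : List (String × String) :=
  rels.map (fun r => (pvKindA r, pvOpA r))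

def pvFlat (rels : List (List (String × List (String × String)))) : List (String × String) :=
  (PySem.List.sorted (PySem.Set.ofList (rels.map pvKindA)) (fun x => x)).flatMap
    (fun k => (PySem.List.sorted (PySem.Set.ofList (pvOps rels k)) (fun x => x)).map (fun o => (k, o)))

-- A's matrix lookups
lemma getD_foldl_outer (rs : List (List (String × List (String × String))))
    (m : PySem.Dict String (PySem.Dict String Int)) (k : String) :
    ((rs.foldl (fun m rel =>
        m.modify (pvKindA rel) (PySem.Dict.mk []) (fun inner => inner.modify (pvOpA rel) 0 (· + 1))) m).getD
      k (PySem.Dict.mk []))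
    = (rs.filter (fun r => pvKindA r == k)).foldl
        (fun d r => d.modify (pvOpA r) 0 (· + 1)) (m.getD k (PySem.Dict.mk [])) := by
  induction rs generalizing m with
  | nil => simp
  | cons r rs ih =>
    simp only [List.foldl_cons, List.filter_cons]
    rw [ih]
    rw [PySem.Dict.getD_modify]
    by_cases h : pvKindA r = k
    · simp [h]
    · simp [h, Ne.symm h]

lemma matrix_getD (rels : List (List (String × List (String × String)))) (k : String) :
    ((rels.foldl (fun m rel =>
        m.modify (pvKindA rel) (PySem.Dict.mk []) (fun inner => inner.modify (pvOpA rel) 0 (· + 1)))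
      (PySem.Dict.mk [])).getD k (PySem.Dict.mk []))
    = PySem.Dict.counter (pvOps rels k) := by
  rw [getD_foldl_outer]
  unfold pvOps
  rw [PySem.Dict.counter_eq_foldl, List.foldl_map]
  rfl

lemma matrix_keys (rels : List (List (String × List (String × String)))) :
    ((rels.foldl (fun m rel =>
        m.modify (pvKindA rel) (PySem.Dict.mk []) (fun inner => inner.modify (pvOpA rel) 0 (· + 1)))
      (PySem.Dict.mk [] : PySem.Dict String (PySem.Dict String Int))).keys)
    = PySem.Set.ofList (rels.map pvKindA) := by
  rw [PySem.Dict.keys_foldl_modify_key rels pvKindA (PySem.Dict.mk [])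
    (fun _ rel => fun inner => inner.modify (pvOpA rel) 0 (· + 1)) (PySem.Dict.mk [])]
  rfl

lemma count_ops (rels : List (List (String × List (String × String)))) (k o : String) :
    (pvOps rels k).count o = (pvPairs rels).count (k, o) := by
  unfold pvOps pvPairs
  simp only [List.count_eq_countP, List.countP_map, List.countP_filter]
  refine List.countP_congr (fun r _ => ?_)
  simp only [Function.comp_apply, beq_iff_eq, Prod.mk.injEq]
  by_cases h1 : pvKindA r = k <;> by_cases h2 : pvOpA r = o <;> simp [h1, h2]

lemma flat_nodup {rels : List (List (String × List (String × String)))} :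
    (pvFlat rels).Nodup := by
  unfold pvFlat
  rw [List.nodup_flatMap]
  refine ⟨fun k _ => ?_, ?_⟩
  · exact (((PySem.List.sorted_perm _ _ _).nodup_iff).mpr (PySem.Set.nodup_ofList _)).map
      (fun a b hab => by simpa using hab)
  · have hnd : (PySem.List.sorted (PySem.Set.ofList (rels.map pvKindA)) (fun x => x)).Nodup :=
      ((PySem.List.sorted_perm _ _ _).nodup_iff).mpr (PySem.Set.nodup_ofList _)
    refine (List.Pairwise.imp ?_ hnd)
    intro k k' hne p hp hp'
    rcases List.mem_map.mp hp with ⟨o, _, rfl⟩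
    rcases List.mem_map.mp hp' with ⟨o', _, he⟩
    exact hne (congrArg Prod.fst he).symm

lemma mem_flat {rels : List (List (String × List (String × String)))}
    {p : String × String} : p ∈ pvFlat rels ↔ p ∈ pvPairs rels := by
  unfold pvFlat
  rw [List.mem_flatMap]
  constructor
  · rintro ⟨k, hk, hp⟩
    rcases List.mem_map.mp hp with ⟨o, ho, rfl⟩
    rw [PySem.List.mem_sorted, PySem.Set.mem_ofList] at ho
    unfold pvOps at ho
    rcases List.mem_map.mp ho with ⟨r, hr, rfl⟩
    rcases List.mem_filter.mp hr with ⟨hr, hrk⟩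
    unfold pvPairs
    exact List.mem_map.mpr ⟨r, hr, by rw [eq_of_beq hrk]⟩
  · intro hp
    rcases List.mem_map.mp hp with ⟨r, hr, rfl⟩
    refine ⟨pvKindA r, ?_, ?_⟩
    · rw [PySem.List.mem_sorted, PySem.Set.mem_ofList]
      exact List.mem_map.mpr ⟨r, hr, rfl⟩
    · refine List.mem_map.mpr ⟨pvOpA r, ?_, rfl⟩
      rw [PySem.List.mem_sorted, PySem.Set.mem_ofList]
      unfold pvOps
      exact List.mem_map.mpr ⟨r, List.mem_filter.mpr ⟨hr, beq_self_eq_true _⟩, rfl⟩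

lemma pairwise_blocks (inner : String → List String) :
    ∀ (ks : List String), ks.Pairwise (· < ·) → (∀ k, (inner k).Pairwise (· < ·)) →
    (ks.flatMap (fun k => (inner k).map (fun o => (k, o)))).Pairwise pvLex := by
  intro ks
  induction ks with
  | nil => intro _ _; simp
  | cons k ks ih =>
    intro hpw hin
    rw [List.flatMap_cons, List.pairwise_append]
    refine ⟨?_, ih hpw.of_cons hin, ?_⟩
    · rw [List.pairwise_map]
      exact (hin k).imp (fun h => Or.inr ⟨rfl, h⟩)
    · rintro a ha b hb
      rcases List.mem_map.mp ha with ⟨o, _, rfl⟩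
      rcases List.mem_flatMap.mp hb with ⟨k', hk', hb'⟩
      rcases List.mem_map.mp hb' with ⟨o', _, rfl⟩
      exact Or.inl ((List.pairwise_cons.mp hpw).1 k' hk')

lemma flat_pairwise (rels : List (List (String × List (String × String)))) :
    (pvFlat rels).Pairwise pvLex :=
  pairwise_blocks _ _ (PySem.List.sorted_ofList_pairwise_lt _)
    (fun _ => PySem.List.sorted_ofList_pairwise_lt _)

-- ordered dedup that mirrors pvRowsB's recursion (proof-only helper)
def pvUniq : List (String × String) → List (String × String)
  | [] => []
  | p :: rest => p :: pvUniq (rest.dropWhile (· == p))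
termination_by l => l.length
decreasing_by
  simp only [List.length_cons]
  exact Nat.lt_succ_of_le (List.length_dropWhile_le _ _)

lemma pvUniq_nil : pvUniq [] = [] := by rw [pvUniq.eq_def]

lemma pvUniq_cons (p : String × String) (rest : List (String × String)) :
    pvUniq (p :: rest) = p :: pvUniq (rest.dropWhile (· == p)) := by rw [pvUniq.eq_def]

lemma mem_pvUniq (l : List (String × String)) (x : String × String) :
    x ∈ pvUniq l ↔ x ∈ l := by
  fun_induction pvUniq l with
  | case1 => simp
  | case2 p rest ih =>
    constructor
    · intro hx
      rcases List.mem_cons.mp hx with rfl | hx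
      · exact List.mem_cons_self
      · exact List.mem_cons_of_mem _ ((List.dropWhile_sublist _).mem (ih.mp hx))
    · intro hx
      rcases List.mem_cons.mp hx with rfl | hx
      · exact List.mem_cons_self
      · conv at hx => rw [← List.takeWhile_append_dropWhile (p := (· == p)) (l := rest)]
        rcases List.mem_append.mp hx with hx | hx
        · have hx' := List.mem_takeWhile_imp hx
          rw [eq_of_beq hx']
          exact List.mem_cons_self
        · exact List.mem_cons_of_mem _ (ih.mpr hx)

lemma not_mem_dropWhile_self (p : String × String) (rest : List (String × String))
    (hpw : rest.Pairwise (fun a b => pvLtB b a = false))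
    (hle : ∀ x ∈ rest, pvLtB x p = false) :
    p ∉ rest.dropWhile (· == p) := by
  induction rest with
  | nil => simp
  | cons r rs ih =>
    rw [List.dropWhile_cons]
    by_cases hr : (r == p) = true
    · simp only [hr, if_true]
      exact ih hpw.of_cons (fun x hx => hle x (List.mem_cons_of_mem _ hx))
    · simp only [hr]
      intro hmem
      rcases List.mem_cons.mp hmem with rfl | hmem
      · exact hr (beq_self_eq_true _)
      · have h1 : pvLtB p r = false := (List.pairwise_cons.mp hpw).1 p hmem
        have h2 : pvLtB r p = false := hle r List.mem_cons_self
        exact hr (beq_iff_eq.mpr (pvLtB_conn r p h2 h1))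

lemma count_head_run (p : String × String) (rest : List (String × String))
    (hpw : rest.Pairwise (fun a b => pvLtB b a = false))
    (hle : ∀ x ∈ rest, pvLtB x p = false) :
    rest.count p = (rest.takeWhile (· == p)).length := by
  conv_lhs => rw [← List.takeWhile_append_dropWhile (p := (· == p)) (l := rest)]
  rw [List.count_append]
  have h1 : (rest.takeWhile (· == p)).count p = (rest.takeWhile (· == p)).length :=
    List.count_eq_length.mpr (fun b hb => by
      have hb' := List.mem_takeWhile_imp hb
      exact (eq_of_beq hb').symm)
  have h2 : (rest.dropWhile (· == p)).count p = 0 :=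
    List.count_eq_zero.mpr (not_mem_dropWhile_self p rest hpw hle)
  rw [h1, h2]
  omega

lemma pvRowsB_eq_map (l : List (String × String))
    (hpw : l.Pairwise (fun a b => pvLtB b a = false)) :
    pvRowsB l = (pvUniq l).map (fun p =>
      "| " ++ p.1 ++ " | " ++ p.2 ++ " | " ++ PySem.Int.toStr ((l.count p : Nat) : Int) ++ " |") := by
  fun_induction pvRowsB l with
  | case1 => simp [pvUniq_nil]
  | case2 p rest ih =>
    rcases List.pairwise_cons.mp hpw with ⟨hle, hrest⟩
    have hdw : (rest.dropWhile (· == p)).Pairwise (fun a b => pvLtB b a = false) :=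
      hrest.sublist (List.dropWhile_sublist _)
    rw [pvUniq_cons, List.map_cons]
    congr 1
    · have hcnt : (p :: rest).count p = 1 + (rest.takeWhile (· == p)).length := by
        rw [List.count_cons_self, count_head_run p rest hrest hle]
        omega
      rw [hcnt]
      push_cast
      ring_nf
    · rw [ih hdw]
      refine List.map_congr_left (fun q hq => ?_)
      have hqdw : q ∈ rest.dropWhile (· == p) := (mem_pvUniq _ _).mp hq
      have hqp : q ≠ p := fun h =>
        not_mem_dropWhile_self p rest hrest hle (h ▸ hqdw)
      have hcnt : (p :: rest).count q = (rest.dropWhile (· == p)).count q := by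
        rw [List.count_cons_of_ne hqp.symm]
        conv_lhs => rw [← List.takeWhile_append_dropWhile (p := (· == p)) (l := rest)]
        rw [List.count_append]
        have : (rest.takeWhile (· == p)).count q = 0 :=
          List.count_eq_zero.mpr (fun hm => by
            have hm' := List.mem_takeWhile_imp hm
            exact hqp (eq_of_beq hm'))
        rw [this, Nat.zero_add]
      rw [hcnt]

lemma pvUniq_pairwise (l : List (String × String))
    (hpw : l.Pairwise (fun a b => pvLtB b a = false)) :
    (pvUniq l).Pairwise pvLex := by
  fun_induction pvUniq l with
  | case1 => simp
  | case2 p rest ih =>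
    rcases List.pairwise_cons.mp hpw with ⟨hle, hrest⟩
    have hdw : (rest.dropWhile (· == p)).Pairwise (fun a b => pvLtB b a = false) :=
      hrest.sublist (List.dropWhile_sublist _)
    refine List.pairwise_cons.mpr ⟨?_, ih hdw⟩
    intro q hq
    have hqdw : q ∈ rest.dropWhile (· == p) := (mem_pvUniq _ _).mp hq
    have hqne : p ≠ q := fun h =>
      not_mem_dropWhile_self p rest hrest hle (h ▸ hqdw)
    rcases pvLex_conn p q hqne with h | h
    · exact h
    · exfalso
      have hq1 : pvLtB q p = true := (pvLtB_iff q p).mpr h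
      have hq2 : pvLtB q p = false := hle q ((List.dropWhile_sublist _).mem hqdw)
      rw [hq1] at hq2
      exact Bool.noConfusion hq2

lemma pvUniq_sorted_eq_flat (rels : List (List (String × List (String × String)))) :
    pvUniq (PySem.List.sorted2 (pvPairs rels) Prod.fst Prod.snd) = pvFlat rels := by
  have hpw := sorted2_pairwise (pvPairs rels)
  have hU : (pvUniq (PySem.List.sorted2 (pvPairs rels) Prod.fst Prod.snd)).Pairwise pvLex :=
    pvUniq_pairwise _ hpw
  have hnodup : (pvUniq (PySem.List.sorted2 (pvPairs rels) Prod.fst Prod.snd)).Nodup :=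
    hU.imp (fun {a b} h => by
      rintro rfl
      exact pvLex_asymm a a h h)
  have hperm : (pvUniq (PySem.List.sorted2 (pvPairs rels) Prod.fst Prod.snd)).Perm (pvFlat rels) := by
    rw [List.perm_ext_iff_of_nodup hnodup flat_nodup]
    intro a
    rw [mem_pvUniq, mem_flat]
    exact (PySem.List.sorted2_perm (pvPairs rels) Prod.fst Prod.snd false).mem_iff
  exact List.Perm.eq_of_pairwise (fun a b _ _ hab hba => pvLtB_conn a b hba hab)
    (hU.imp (fun h => pvLtB_asymm _ _ ((pvLtB_iff _ _).mpr h)))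
    ((flat_pairwise rels).imp (fun h => pvLtB_asymm _ _ ((pvLtB_iff _ _).mpr h)))
    hperm

-- ===== VERDICT (by name: the statement is the Claim_ definition above) =====
theorem relationship_matrix_table_py_spec : Claim_equal_relationship_matrix_table_py := by
  intro rels _
  unfold Spec_relationship_matrix_table_py relationship_matrix_table_py relationship_matrix_table_py_alt
  by_cases h : rels = []
  · simp [h]
  · simp only [if_neg h]
    simp only [PySem.List.foldl_append_singleton_eq_map, PySem.List.foldl_append_eq_flatMap,
      matrix_getD, PySem.Dict.keys_counter, PySem.Dict.getD_counter]
    rw [matrix_keys]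
    have hkey : rels.map pvKeyB = pvPairs rels := rfl
    rw [hkey, pvRowsB_eq_map _ (sorted2_pairwise (pvPairs rels)), pvUniq_sorted_eq_flat]
    congr 1
    congr 1
    have hcnt : ∀ q ∈ pvFlat rels,
        (PySem.List.sorted2 (pvPairs rels) Prod.fst Prod.snd).count q = (pvPairs rels).count q :=
      fun q _ => (PySem.List.sorted2_perm (pvPairs rels) Prod.fst Prod.snd false).count_eq q
    unfold pvFlat
    rw [List.map_flatMap]
    refine List.flatMap_congr (fun k hk => ?_)
    rw [List.map_map]
    refine List.map_congr_left (fun o ho => ?_)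
    simp only [Function.comp_apply]
    rw [count_ops]
    have hmem : (k, o) ∈ pvFlat rels := by
      unfold pvFlat
      exact List.mem_flatMap.mpr ⟨k, hk, List.mem_map.mpr ⟨o, ho, rfl⟩⟩
    rw [hcnt (k, o) hmem]
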